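-- pv_equiv track=rewrite | github.com/pypi-data/pypi-mirror-361 | packages/tree2cmd/tree2cmd-0.1.2.tar.gz/tree2cmd-0.1.2/tree2cmd/utils.py | tree_from_shell_commands
-- ===== SOURCE A (Python) =====
-- def tree_from_shell_commands(commands: list[str]) -> str:
--     from collections import defaultdict
--     import os
--
--     tree = {}
--     for cmd in commands:
--         if 'mkdir -p' in cmd or 'touch' in cmd:
--             path = cmd.split()[-1].strip('"\'')
--             parts = path.strip('/').split('/')
--             current = tree
--             for part in parts:
--                 current = current.setdefault(part, {})
--
--     def _build_tree(d, prefix=''):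
--         lines = []
--         entries = list(d.keys())
--         for i, name in enumerate(entries):
--             is_last = (i == len(entries) - 1)
--             connector = '└── ' if is_last else '├── '
--             lines.append(f"{prefix}{connector}{name}")
--             subtree = d[name]
--             if subtree:
--                 extension = '    ' if is_last else '│   '
--                 lines.extend(_build_tree(subtree, prefix + extension))
--         return lines
--
--     lines = _build_tree(tree)
--     root = next(iter(tree.keys()))
--     count_dirs = sum(1 for c in commands if c.startswith('mkdir -p'))
--     count_files = sum(1 for c in commands if c.startswith('touch'))
--     return f"{root}\n" + '\n'.join(lines[1:]) + f"\n\n{count_dirs} directories, {count_files} files"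
-- ===== SOURCE B (Python) =====
-- def tree_from_shell_commands(commands: list[str]) -> str:
--     tree = {}
--     for cmd in commands:
--         if 'mkdir -p' in cmd or 'touch' in cmd:
--             path = cmd.split()[-1].strip('"\'')
--             parts = path.strip('/').split('/')
--             current = tree
--             for part in parts:
--                 current = current.setdefault(part, {})
--
--     def _frames(d, prefix):
--         entries = list(d.items())
--         n = len(entries)
--         out = []
--         for i, (name, sub) in enumerate(entries):
--             last = (i == n - 1)
--             out.append((prefix + ('└── ' if last else '├── ') + name,
--                         sub,
--                         prefix + ('    ' if last else '│   ')))
--         return out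
--
--     lines = []
--     stack = list(reversed(_frames(tree, '')))
--     while stack:
--         line, sub, pfx = stack.pop()
--         lines.append(line)
--         if sub:
--             stack.extend(reversed(_frames(sub, pfx)))
--
--     root = next(iter(tree.keys()))
--     count_dirs = sum(1 for c in commands if c.startswith('mkdir -p'))
--     count_files = sum(1 for c in commands if c.startswith('touch'))
--     return f"{root}\n" + '\n'.join(lines[1:]) + f"\n\n{count_dirs} directories, {count_files} files"
-- ===== Notes on version B (the rewrite author's own statement) =====
-- stated objective: alternative
-- what changed: The recursive _build_tree renderer is replaced by an iterative depth-first traversal over an explicit stack of (line, subtree, prefix) frames; parsing, counts and final formatting are unchanged.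
import Mathlib
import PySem

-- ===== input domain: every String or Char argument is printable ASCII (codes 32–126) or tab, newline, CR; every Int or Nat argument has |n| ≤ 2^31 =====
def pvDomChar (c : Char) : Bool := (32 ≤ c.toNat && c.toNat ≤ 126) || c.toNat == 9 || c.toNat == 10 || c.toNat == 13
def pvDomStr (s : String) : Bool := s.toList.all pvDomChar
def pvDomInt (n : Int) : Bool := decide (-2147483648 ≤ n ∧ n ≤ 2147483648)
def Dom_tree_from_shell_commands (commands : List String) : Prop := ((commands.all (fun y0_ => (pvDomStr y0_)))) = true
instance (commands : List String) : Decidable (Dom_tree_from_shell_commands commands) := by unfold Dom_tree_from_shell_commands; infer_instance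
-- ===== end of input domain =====

-- B replaces A's recursive tree renderer by an iterative DFS over an explicit stack of
-- (line, subtree, prefix) frames; parsing, counting and final formatting are unchanged (objective: alternative).

-- ===== PORT A =====
-- The nested Python dicts {name: subdict} are modelled by PTree: a node is the insertion-ordered
-- chain of its (name, subtree) entries (nil = empty dict, cons name sub rest).
inductive PTree where
  | nil : PTree
  | cons : String → PTree → PTree → PTree
deriving DecidableEq, Repr

def ptSize : PTree → Nat
  | .nil => 1
  | .cons _ s r => 1 + ptSize s + ptSize r

-- the inner  `current = tree; for part in parts: current = current.setdefault(part, {})`  loop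
def insertPath : PTree → List String → PTree
  | d, [] => d
  | .nil, p :: ps => .cons p (insertPath .nil ps) .nil
  | .cons k sub r, p :: ps =>
      if k = p then .cons k (insertPath sub ps) r
      else .cons k sub (insertPath r (p :: ps))
termination_by d ps => (ps.length, ptSize d)
decreasing_by
  all_goals simp [Prod.lex_def, ptSize]

def parseStep (t : PTree) (cmd : String) : PTree :=
  if PySem.Str.isIn "mkdir -p" cmd || PySem.Str.isIn "touch" cmd then
    match PySem.List.pyGet? (PySem.Str.split₀ cmd) (-1) with
    | some w =>
        let path := PySem.Str.stripChars w "\"'"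
        -- split? is `some` here because the separator "/" is nonempty
        insertPath t ((PySem.Str.split? (PySem.Str.stripChars path "/") "/").getD [])
    | none => t  -- unreachable: the matched substring contains non-whitespace, so cmd.split() is nonempty
  else t

-- the `for cmd in commands:` dict-building loop (shared verbatim by both Pythons)
def buildTreeT (commands : List String) : PTree := commands.foldl parseStep PTree.nil

-- sum(1 for c in commands if c.startswith(p))  (identical in both Pythons)
def countPrefix (commands : List String) (p : String) : Int :=
  commands.foldl (fun a c => if PySem.Str.startswith c p then a + 1 else a) 0

-- next(iter(tree.keys())); Python raises StopIteration on an empty tree — excluded by Pre_ below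
def rootName : PTree → String
  | .nil => ""
  | .cons k _ _ => k

-- A's recursive _build_tree
def buildA : PTree → String → List String
  | .nil, _ => []
  | .cons name sub rest, pfx =>
      (pfx ++ (if rest = PTree.nil then "└── " else "├── ") ++ name)
        :: ((if sub ≠ PTree.nil then
               buildA sub (pfx ++ (if rest = PTree.nil then "    " else "│   "))
             else []) ++ buildA rest pfx)

def tree_from_shell_commands (commands : List String) : String :=
  let tree := buildTreeT commands
  let lines := buildA tree ""
  let root := rootName tree
  let count_dirs := countPrefix commands "mkdir -p"
  let count_files := countPrefix commands "touch"
  root ++ "\n" ++ PySem.Str.join "\n" (lines.drop 1) ++ "\n\n" ++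
    PySem.Int.toStr count_dirs ++ " directories, " ++ PySem.Int.toStr count_files ++ " files"

-- ===== PORT B =====
-- list(d.items()) of a PTree node
def toEntries : PTree → List (String × PTree)
  | .nil => []
  | .cons k s r => (k, s) :: toEntries r

-- B's _frames: enumerate the entries, flag the last one, build (line, subtree, child-prefix) triples
def framesB (d : PTree) (pfx : String) : List (String × PTree × String) :=
  let entries := toEntries d
  let n : Int := entries.length
  (PySem.List.enumerate entries).map (fun ie =>
    (pfx ++ (if ie.1 = n - 1 then "└── " else "├── ") ++ ie.2.1,
     ie.2.2,
     pfx ++ (if ie.1 = n - 1 then "    " else "│   ")))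

def frameSize (f : String × PTree × String) : Nat := 1 + ptSize f.2.1

def stackSize (st : List (String × PTree × String)) : Nat := (st.map frameSize).sum

-- helper lemmas cited by runB's decreasing_by (termination of the port itself)
theorem stackSize_append (a b : List (String × PTree × String)) :
    stackSize (a ++ b) = stackSize a + stackSize b := by
  simp [stackSize]

-- position-from-the-end view of framesB's enumerate-with-last-flag (used for termination and the proofs)
def framesGold : List (String × PTree) → String → List (String × PTree × String)
  | [], _ => []
  | (k, s) :: E, pfx =>
      (pfx ++ (if E = [] then "└── " else "├── ") ++ k, s,
       pfx ++ (if E = [] then "    " else "│   ")) :: framesGold E pfx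

theorem enumerate_lastflag (E : List (String × PTree)) :
    ∀ (s : Int) (pfx : String),
    (PySem.List.enumerate E s).map (fun ie =>
      (pfx ++ (if ie.1 = (s + E.length) - 1 then "└── " else "├── ") ++ ie.2.1,
       ie.2.2,
       pfx ++ (if ie.1 = (s + E.length) - 1 then "    " else "│   "))) = framesGold E pfx := by
  induction E with
  | nil => intro s pfx; simp [framesGold, PySem.List.enumerate_nil]
  | cons e E ih =>
      intro s pfx
      obtain ⟨k, sub⟩ := e
      have harg : s + (((k, sub) :: E).length : Int) = (s + 1) + E.length := by
        push_cast [List.length_cons]; ring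
      rw [harg, PySem.List.enumerate_cons, List.map_cons, ih (s + 1) pfx]
      show _ :: _ = framesGold ((k, sub) :: E) pfx
      simp only [framesGold]
      by_cases hE : E = []
      · subst hE; norm_num
      · have hlen : (E.length : Int) ≠ 0 := by
          intro h
          exact hE (List.length_eq_zero_iff.mp (by exact_mod_cast h))
        have hflag : ¬ ((s : Int) = s + 1 + (E.length : Int) - 1) := by omega
        simp [hE, hflag]

theorem framesB_eq_gold (d : PTree) (pfx : String) :
    framesB d pfx = framesGold (toEntries d) pfx := by
  have := enumerate_lastflag (toEntries d) 0 pfx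
  simpa [framesB] using this

theorem stackSize_framesB (d : PTree) (pfx : String) :
    stackSize (framesB d pfx) ≤ ptSize d := by
  rw [framesB_eq_gold]
  induction d generalizing pfx with
  | nil => simp [toEntries, framesGold, stackSize, ptSize]
  | cons k s r _ ihr =>
      have := ihr pfx
      simp only [toEntries, framesGold, stackSize, List.map_cons, List.sum_cons,
        frameSize, ptSize] at *
      omega

-- B's  `while stack:` loop.  The Lean list's HEAD is the top of Python's stack, so Python's
-- `list(reversed(frames))` + pop-from-the-end and `stack.extend(reversed(frames))` are modelled
-- by starting from / prepending `framesB …` in order.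
def runB : List (String × PTree × String) → List String → List String
  | [], lines => lines
  | (line, sub, pfx) :: rest, lines =>
      runB ((if sub ≠ PTree.nil then framesB sub pfx else []) ++ rest) (lines ++ [line])
termination_by st _ => stackSize st
decreasing_by
  have h1 := stackSize_framesB sub pfx
  rw [stackSize_append]
  simp only [stackSize, List.map_cons, List.sum_cons, frameSize]
  simp only [stackSize] at h1
  split_ifs with h
  · omega
  · simp only [List.map_nil, List.sum_nil]; omega

def tree_from_shell_commands_alt (commands : List String) : String :=
  let tree := buildTreeT commands
  let lines := runB (framesB tree "") []
  let root := rootName tree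
  let count_dirs := countPrefix commands "mkdir -p"
  let count_files := countPrefix commands "touch"
  root ++ "\n" ++ PySem.Str.join "\n" (lines.drop 1) ++ "\n\n" ++
    PySem.Int.toStr count_dirs ++ " directories, " ++ PySem.Int.toStr count_files ++ " files"

-- ===== PRECONDITION & SPEC =====
-- Pre_ excludes exactly the inputs where no command mentions 'mkdir -p' or 'touch': there the tree
-- is empty and Python A raises StopIteration at next(iter(tree.keys())) (B raises there too).
def Pre_tree_from_shell_commands (commands : List String) : Prop :=
  ∃ c ∈ commands, PySem.Str.isIn "mkdir -p" c = true ∨ PySem.Str.isIn "touch" c = true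
instance (commands : List String) : Decidable (Pre_tree_from_shell_commands commands) := by
  unfold Pre_tree_from_shell_commands; infer_instance

def pvWitness_tree_from_shell_commands : List String := ["mkdir -p a/b", "touch a/c.txt"]

def Spec_tree_from_shell_commands (commands : List String) (out : String) : Prop := out = tree_from_shell_commands_alt commands
instance (commands : List String) (out : String) : Decidable (Spec_tree_from_shell_commands commands out) := by unfold Spec_tree_from_shell_commands; infer_instance

-- ===== CLAIM (what is proved, stated in full; the proofs are below) =====
def Claim_equal_tree_from_shell_commands : Prop := ∀ (commands : List String), Dom_tree_from_shell_commands commands → Pre_tree_from_shell_commands commands → Spec_tree_from_shell_commands commands (tree_from_shell_commands commands)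

-- ===== LEMMAS AND PROOFS =====

theorem toEntries_eq_nil_iff (d : PTree) : toEntries d = [] ↔ d = PTree.nil := by
  cases d <;> simp [toEntries]

theorem framesB_nil (pfx : String) : framesB PTree.nil pfx = [] := by
  rw [framesB_eq_gold]; simp [toEntries, framesGold]

theorem framesB_cons (k : String) (s r : PTree) (pfx : String) :
    framesB (PTree.cons k s r) pfx =
      (pfx ++ (if r = PTree.nil then "└── " else "├── ") ++ k, s,
       pfx ++ (if r = PTree.nil then "    " else "│   ")) :: framesB r pfx := by
  rw [framesB_eq_gold, framesB_eq_gold]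
  simp [toEntries, framesGold, toEntries_eq_nil_iff]

-- the stack machine emits exactly A's recursive lines, in order
theorem runB_framesB (d : PTree) :
    ∀ (pfx : String) (rest : List (String × PTree × String)) (acc : List String),
    runB (framesB d pfx ++ rest) acc = runB rest (acc ++ buildA d pfx) := by
  induction d with
  | nil => intro pfx rest acc; simp [framesB_nil, buildA]
  | cons k s r ihs ihr =>
      intro pfx rest acc
      rw [framesB_cons, List.cons_append, runB]
      by_cases hs : s = PTree.nil
      · subst hs
        simp only [ne_eq, not_true_eq_false, List.nil_append, ite_false]
        rw [ihr]
        simp [buildA]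
      · rw [if_pos (show s ≠ PTree.nil from hs), ihs, ihr]
        simp [buildA, hs, List.append_assoc]

-- ===== VERDICT (by name: the statement is the Claim_ definition above) =====
theorem tree_from_shell_commands_spec : Claim_equal_tree_from_shell_commands := by
  intro commands _ _
  unfold Spec_tree_from_shell_commands tree_from_shell_commands tree_from_shell_commands_alt
  dsimp only
  have h := runB_framesB (buildTreeT commands) "" [] []
  rw [List.append_nil] at h
  rw [h]
  simp [runB]
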